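-- pv_equiv track=rewrite | github.com/ynput/OpenPype | openpype/tools/publisher/widgets/models.py | get_intersection_of_tasks
-- ===== SOURCE A (Python) =====
-- def get_intersection_of_tasks(task_names_by_asset_name):
--     """Calculate intersection of task names from passed data.
--
--     Example:
--     ```
--     # Passed `task_names_by_asset_name`
--     {
--         "asset_1": ["compositing", "animation"],
--         "asset_2": ["compositing", "editorial"]
--     }
--     ```
--     Result:
--     ```
--     # Set
--     {"compositing"}
--     ```
--
--     Args:
--         task_names_by_asset_name (dict): Task names in iterable by parent.
--     """
--     tasks = None
--     for task_names in task_names_by_asset_name.values():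
--         if tasks is None:
--             tasks = set(task_names)
--         else:
--             tasks &= set(task_names)
--
--         if not tasks:
--             break
--     return tasks or set()
-- ===== SOURCE B (Python) =====
-- def get_intersection_of_tasks(task_names_by_asset_name):
--     n = len(task_names_by_asset_name)
--     counts = {}
--     for task_names in task_names_by_asset_name.values():
--         for name in set(task_names):
--             counts[name] = counts.get(name, 0) + 1
--     return {name for name, count in counts.items() if count == n}
-- ===== Notes on version B (the rewrite author's own statement) =====
-- stated objective: alternative
-- what changed: Replaces the progressive pairwise set intersection (with early break) by a single counting pass: a dict counts in how many assets each task name occurs (deduplicated per asset), and the result is the set of names whose count equals the number of assets.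
import Mathlib
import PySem

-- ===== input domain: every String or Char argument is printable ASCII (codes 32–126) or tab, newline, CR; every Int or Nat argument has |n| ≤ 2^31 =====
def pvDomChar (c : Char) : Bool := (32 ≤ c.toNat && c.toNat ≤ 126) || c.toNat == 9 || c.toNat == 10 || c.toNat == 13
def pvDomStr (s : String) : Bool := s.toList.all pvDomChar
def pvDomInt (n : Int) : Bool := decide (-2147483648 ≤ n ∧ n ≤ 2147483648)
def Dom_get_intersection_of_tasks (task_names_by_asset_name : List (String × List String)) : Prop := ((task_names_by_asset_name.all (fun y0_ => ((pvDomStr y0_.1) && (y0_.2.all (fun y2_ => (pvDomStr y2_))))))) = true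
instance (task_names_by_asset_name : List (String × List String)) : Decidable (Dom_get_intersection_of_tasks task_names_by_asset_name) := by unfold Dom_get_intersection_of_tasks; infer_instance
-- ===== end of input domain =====

-- ===== PORT A =====
-- B replaces A's progressive pairwise set intersection (with early break) by a single counting
-- pass over a dict; the return values are proved equal on all inputs.
def pvALoop (tasks : Option (List String)) : List (List String) → Option (List String)
  | [] => tasks
  | tn :: rest =>
    let t : PySem.Set String :=
      match tasks with
      | none => PySem.Set.ofList tn
      | some s => PySem.Set.inter s (PySem.Set.ofList tn)
    if t = [] then some t else pvALoop (some t) rest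

def get_intersection_of_tasks (task_names_by_asset_name : List (String × List String)) : List String :=
  match pvALoop none (task_names_by_asset_name.map Prod.snd) with
  | none => PySem.Set.empty
  | some t => if t = [] then PySem.Set.empty else t

-- ===== PORT B =====
def pvCounts (task_names_by_asset_name : List (String × List String)) : PySem.Dict String Int :=
  task_names_by_asset_name.foldl
    (fun d p => (PySem.Set.ofList p.2).foldl (fun d name => d.modify name 0 (· + 1)) d)
    PySem.Dict.empty

def get_intersection_of_tasks_alt (task_names_by_asset_name : List (String × List String)) : List String :=
  let n : Int := task_names_by_asset_name.length
  PySem.Set.ofList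
    (((pvCounts task_names_by_asset_name).items.filter (fun p => p.2 == n)).map Prod.fst)

-- ===== PRECONDITION & SPEC =====
def Spec_get_intersection_of_tasks (task_names_by_asset_name : List (String × List String)) (out : List String) : Prop := out = get_intersection_of_tasks_alt task_names_by_asset_name
instance (task_names_by_asset_name : List (String × List String)) (out : List String) : Decidable (Spec_get_intersection_of_tasks task_names_by_asset_name out) := by unfold Spec_get_intersection_of_tasks; infer_instance

-- ===== CLAIM (what is proved, stated in full; the proofs are below) =====
def Claim_equal_get_intersection_of_tasks : Prop := ∀ (task_names_by_asset_name : List (String × List String)), Dom_get_intersection_of_tasks task_names_by_asset_name → Spec_get_intersection_of_tasks task_names_by_asset_name (get_intersection_of_tasks task_names_by_asset_name)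

-- ===== LEMMAS AND PROOFS =====

theorem pv_inter_eq (s : List String) (tn : List String) :
    PySem.Set.inter s (PySem.Set.ofList tn) = s.filter (fun x => decide (x ∈ tn)) := by
  unfold PySem.Set.inter
  exact List.filter_congr (fun x _ => by simp [PySem.Set.mem_ofList])

theorem pv_filter_cons (s tn : List String) (rest : List (List String)) :
    s.filter (fun x => (tn :: rest).all (fun t => decide (x ∈ t)))
      = (s.filter (fun x => decide (x ∈ tn))).filter (fun x => rest.all (fun t => decide (x ∈ t))) := by
  rw [List.filter_filter]
  exact List.filter_congr (fun x _ => by simp [Bool.and_comm])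

theorem pvALoop_some (L : List (List String)) (s : List String) :
    pvALoop (some s) L = some (s.filter (fun x => L.all (fun tn => decide (x ∈ tn)))) := by
  induction L generalizing s with
  | nil => simp [pvALoop]
  | cons tn rest ih =>
    simp only [pvALoop, pv_inter_eq]
    by_cases h : s.filter (fun x => decide (x ∈ tn)) = []
    · rw [if_pos h, pv_filter_cons, h, List.filter_nil]
    · rw [if_neg h, ih, pv_filter_cons]

theorem pvALoop_none (tn : List String) (L : List (List String)) :
    pvALoop none (tn :: L) =
      some ((PySem.Set.ofList tn).filter (fun x => (tn :: L).all (fun t => decide (x ∈ t)))) := by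
  simp only [pvALoop]
  by_cases h : (PySem.Set.ofList tn : List String) = []
  · rw [if_pos h, h]
    simp
  · rw [if_neg h, pvALoop_some]
    congr 1
    refine (List.filter_congr (fun x hx => ?_)).symm
    have : x ∈ tn := (PySem.Set.mem_ofList tn x).1 hx
    simp [this]

def pvStep (d : PySem.Dict String Int) (p : String × List String) : PySem.Dict String Int :=
  (PySem.Set.ofList p.2).foldl (fun d name => d.modify name 0 (· + 1)) d

theorem pv_keys_foldl (m : List (String × List String)) (d : PySem.Dict String Int) :
    (m.foldl pvStep d).keys
      = m.foldl (fun ks p => PySem.Set.update ks (PySem.Set.ofList p.2)) d.keys := by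
  induction m generalizing d with
  | nil => rfl
  | cons q rest ih =>
    simp only [List.foldl_cons, ih, pvStep, PySem.Dict.keys_foldl_modify]

theorem pv_getD_foldl (m : List (String × List String)) (d : PySem.Dict String Int) (k : String) :
    (m.foldl pvStep d).getD k 0
      = d.getD k 0 + (m.countP (fun p => decide (k ∈ p.2)) : Int) := by
  induction m generalizing d with
  | nil => simp
  | cons q rest ih =>
    simp only [List.foldl_cons, ih, pvStep, PySem.Dict.getD_foldl_modify_add_one,
      List.countP_cons]
    have hc : List.count k (PySem.Set.ofList q.2) = if decide (k ∈ q.2) = true then 1 else 0 := by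
      by_cases h : k ∈ q.2
      · simp [h]
      · simp [h, List.count_eq_zero.2 (fun hk => h ((PySem.Set.mem_ofList q.2 k).1 hk))]
    rw [hc]
    push_cast
    split_ifs <;> ring

theorem pv_nodup_upd_foldl (m : List (String × List String)) (s : PySem.Set String)
    (hs : s.Nodup) :
    (m.foldl (fun ks p => PySem.Set.update ks (PySem.Set.ofList p.2)) s).Nodup := by
  induction m generalizing s with
  | nil => exact hs
  | cons q rest ih => exact ih _ (PySem.Set.nodup_update _ _ hs)

theorem pv_prefix_upd_foldl (m : List (String × List String)) (s : PySem.Set String) :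
    s <+: m.foldl (fun ks p => PySem.Set.update ks (PySem.Set.ofList p.2)) s := by
  induction m generalizing s with
  | nil => exact List.prefix_refl s
  | cons q rest ih =>
    refine List.IsPrefix.trans ?_ (ih _)
    show s <+: PySem.Set.update s (PySem.Set.ofList q.2)
    rw [PySem.Set.update_eq_append_filter]
    exact List.prefix_append _ _

theorem pvCounts_eq (m : List (String × List String)) : pvCounts m = m.foldl pvStep PySem.Dict.empty := rfl

theorem pv_keys_nodup (m : List (String × List String)) : (pvCounts m).keys.Nodup := by
  rw [pvCounts_eq, pv_keys_foldl]
  exact pv_nodup_upd_foldl m _ (by simp [PySem.Dict.keys_empty])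

theorem pv_alt_eq_filter (m : List (String × List String)) :
    get_intersection_of_tasks_alt m
      = PySem.Set.ofList ((pvCounts m).keys.filter
          (fun k => m.all (fun p => decide (k ∈ p.2)))) := by
  unfold get_intersection_of_tasks_alt
  rw [PySem.Dict.items_eq_map_keys _ (pv_keys_nodup m) 0]
  simp only [List.filter_map, List.map_map]
  congr 1
  rw [show (Prod.fst ∘ fun k => (k, (pvCounts m).getD k 0)) = id from rfl, List.map_id]
  refine List.filter_congr (fun k _ => ?_)
  show ((pvCounts m).getD k 0 == (m.length : Int)) = _
  rw [pvCounts_eq, pv_getD_foldl, PySem.Dict.getD_empty, zero_add]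
  by_cases h : m.countP (fun p => decide (k ∈ p.2)) = m.length
  · have := List.countP_eq_length.1 h
    simp [h, List.all_eq_true.2 this]
  · have hall : ¬ (m.all (fun p => decide (k ∈ p.2)) = true) := by
      intro hall
      exact h (List.countP_eq_length.2 (List.all_eq_true.1 hall))
    simp [h, hall, Nat.cast_inj]

theorem pv_keys_cons (q : String × List String) (rest : List (String × List String)) :
    (pvCounts (q :: rest)).keys
      = rest.foldl (fun ks p => PySem.Set.update ks (PySem.Set.ofList p.2)) (PySem.Set.ofList q.2) := by
  rw [pvCounts_eq, pv_keys_foldl, PySem.Dict.keys_empty, List.foldl_cons,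
    PySem.Set.update_nil_left, PySem.Set.ofList_ofList]

theorem pv_main (m : List (String × List String)) :
    get_intersection_of_tasks m = get_intersection_of_tasks_alt m := by
  cases m with
  | nil => rfl
  | cons q rest =>
    rw [pv_alt_eq_filter]
    unfold get_intersection_of_tasks
    simp only [List.map_cons]
    rw [pvALoop_none]
    dsimp only
    have hpredA : (PySem.Set.ofList q.2).filter
        (fun x => (q.2 :: rest.map Prod.snd).all (fun t => decide (x ∈ t)))
        = (PySem.Set.ofList q.2).filter (fun k => (q :: rest).all (fun p => decide (k ∈ p.2))) := by
      refine List.filter_congr (fun x _ => ?_)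
      simp [List.all_map, Function.comp_def]
    -- the B side filter collapses to the first asset's set
    obtain ⟨r, hr⟩ := (pv_keys_cons q rest ▸ pv_prefix_upd_foldl rest (PySem.Set.ofList q.2) :
      PySem.Set.ofList q.2 <+: (pvCounts (q :: rest)).keys)
    have hnd : ((PySem.Set.ofList q.2 : List String) ++ r).Nodup := by
      rw [hr]; exact pv_keys_nodup (q :: rest)
    have hdisj := (List.nodup_append.1 hnd).2.2
    have hrfilter : r.filter (fun k => (q :: rest).all (fun p => decide (k ∈ p.2))) = [] := by
      refine List.filter_eq_nil_iff.2 (fun x hx => ?_)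
      have hxn : x ∉ q.2 := by
        intro hmem
        exact hdisj x ((PySem.Set.mem_ofList q.2 x).2 hmem) x hx rfl
      simp [hxn]
    have hBfilter : (pvCounts (q :: rest)).keys.filter
        (fun k => (q :: rest).all (fun p => decide (k ∈ p.2)))
        = (PySem.Set.ofList q.2).filter (fun k => (q :: rest).all (fun p => decide (k ∈ p.2))) := by
      rw [← hr, List.filter_append, hrfilter, List.append_nil]
    rw [hBfilter, ← hpredA]
    split_ifs with h
    · rw [h]; rfl
    · exact (PySem.Set.ofList_eq_self_of_nodup _
        (List.Nodup.filter _ (PySem.Set.nodup_ofList q.2))).symm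

-- ===== VERDICT (by name: the statement is the Claim_ definition above) =====
theorem get_intersection_of_tasks_spec : Claim_equal_get_intersection_of_tasks := by
  intro m _
  unfold Spec_get_intersection_of_tasks
  exact pv_main m
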